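-- pv_equiv track=rewrite | github.com/christt105/PokemonFollowingRenegadePlatinumTranslation | translate_following.py | extract_special_chars
-- ===== SOURCE A (Python) =====
-- def extract_special_chars(text):
--     special_chars = []
--     i = 0
--     while i < len(text):
--         if text[i:i+2] == "\\v":
--             special_chars.append(text[i:i+10])
--             i += 10
--         elif text[i:i+2] == "\\x":
--             special_chars.append(text[i:i+6])
--             i += 6
--         elif text[i:i+2] == "\\n":
--             special_chars.append(text[i:i+2])
--             i += 2
--         else:
--             i += 1
--     return special_chars
-- ===== SOURCE B (Python) =====
-- import re
--
-- # One alternation pattern; re.findall performs the left-to-right non-overlapping scan.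
-- # Bounded quantifiers {0,8}/{0,4} reproduce the truncated slices near the end of the
-- # string, and DOTALL lets the filler characters include real newlines.
-- _PATTERN = re.compile(r'\\v.{0,8}|\\x.{0,4}|\\n', re.DOTALL)
--
-- def extract_special_chars(text):
--     return _PATTERN.findall(text)
-- ===== Notes on version B (the rewrite author's own statement) =====
-- stated objective: faster
-- what changed: B replaces A's manual index walk with its chain of 2-char slice comparisons and hand-maintained step sizes by a single re.findall over the alternation r'\\v.{0,8}|\\x.{0,4}|\\n' with DOTALL, letting the regex engine do the left-to-right non-overlapping scan.
import Mathlib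
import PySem

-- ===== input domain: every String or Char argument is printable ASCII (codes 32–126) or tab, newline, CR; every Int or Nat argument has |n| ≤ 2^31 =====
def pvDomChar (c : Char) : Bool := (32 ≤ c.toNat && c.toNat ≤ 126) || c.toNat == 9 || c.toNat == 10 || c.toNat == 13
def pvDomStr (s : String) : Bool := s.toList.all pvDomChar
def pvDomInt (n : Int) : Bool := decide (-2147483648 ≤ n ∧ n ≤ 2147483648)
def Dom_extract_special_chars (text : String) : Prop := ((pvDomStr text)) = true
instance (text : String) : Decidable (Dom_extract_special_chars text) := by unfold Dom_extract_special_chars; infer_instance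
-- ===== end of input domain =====

-- B replaces A's manual index walk over 2-char slices by one regex findall over the alternation
-- r'\\v.{0,8}|\\x.{0,4}|\\n' (DOTALL); same return value.

-- ===== PORT A =====
-- literal port of A's while loop: i steps by 1/2/6/10, the 2-char slice compared against each pattern
def goA (text : String) (i : Nat) : List String :=
  if h : i < text.length then
    if PySem.Str.slice text (some (i : Int)) (some ((i : Int) + 2)) = "\\v" then
      PySem.Str.slice text (some (i : Int)) (some ((i : Int) + 10)) :: goA text (i + 10)
    else if PySem.Str.slice text (some (i : Int)) (some ((i : Int) + 2)) = "\\x" then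
      PySem.Str.slice text (some (i : Int)) (some ((i : Int) + 6)) :: goA text (i + 6)
    else if PySem.Str.slice text (some (i : Int)) (some ((i : Int) + 2)) = "\\n" then
      PySem.Str.slice text (some (i : Int)) (some ((i : Int) + 2)) :: goA text (i + 2)
    else goA text (i + 1)
  else []
termination_by text.length - i
decreasing_by all_goals omega

def extract_special_chars (text : String) : List String := goA text 0

-- ===== PORT B =====
-- hand port (PySem has no regex engine) of re.findall(r'\\v.{0,8}|\\x.{0,4}|\\n', text, re.DOTALL):
-- the left-to-right non-overlapping scan of the alternation; each arm is one regex branch —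
-- '\\v' then up to 8 arbitrary chars (greedy, DOTALL), '\\x' then up to 4, or '\\n'; on no match
-- at this position the engine moves one char right.  Exact on all inputs.
def scanB : List Char → List String
  | [] => []
  | '\\' :: 'v' :: rest => String.ofList ('\\' :: 'v' :: rest.take 8) :: scanB (rest.drop 8)
  | '\\' :: 'x' :: rest => String.ofList ('\\' :: 'x' :: rest.take 4) :: scanB (rest.drop 4)
  | '\\' :: 'n' :: rest => String.ofList ['\\', 'n'] :: scanB rest
  | _ :: rest => scanB rest
termination_by l => l.length
decreasing_by all_goals (simp; try omega)

def extract_special_chars_alt (text : String) : List String := scanB text.toList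

-- ===== PRECONDITION & SPEC =====
def Spec_extract_special_chars (text : String) (out : List String) : Prop := out = extract_special_chars_alt text
instance (text : String) (out : List String) : Decidable (Spec_extract_special_chars text out) := by unfold Spec_extract_special_chars; infer_instance

-- ===== CLAIM (what is proved, stated in full; the proofs are below) =====
def Claim_equal_extract_special_chars : Prop := ∀ (text : String), Dom_extract_special_chars text → Spec_extract_special_chars text (extract_special_chars text)

-- ===== LEMMAS AND PROOFS =====

theorem sliceN_toList (text : String) (i n : Nat) :
    (PySem.Str.slice text (some (i : Int)) (some ((i : Int) + (n : Int)))).toList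
      = (text.toList.drop i).take n := by
  rw [PySem.Str.toList_slice, PySem.Chars.slice_eq_listSlice, PySem.List.slice_natCast_add]

theorem ofList_eq_iff (l : List Char) (r : String) : (String.ofList l = r) ↔ l = r.toList := by
  rw [← String.toList_inj, String.toList_ofList]

-- a slice text[i:i+n] as String.ofList of the list-side take
theorem slice_as_ofList (text : String) (i n : Nat) :
    PySem.Str.slice text (some (i : Int)) (some ((i : Int) + (n : Int)))
      = String.ofList ((text.toList.drop i).take n) := by
  rw [← String.toList_inj, String.toList_ofList, sliceN_toList]

-- scanB equation lemmas (the match compiles char literals to tests; split re-exposes them)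
theorem scanB_v (rest : List Char) :
    scanB ('\\' :: 'v' :: rest)
      = String.ofList ('\\' :: 'v' :: rest.take 8) :: scanB (rest.drop 8) := by
  simp [scanB]

theorem scanB_x (rest : List Char) :
    scanB ('\\' :: 'x' :: rest)
      = String.ofList ('\\' :: 'x' :: rest.take 4) :: scanB (rest.drop 4) := by
  simp [scanB]

theorem scanB_n (rest : List Char) :
    scanB ('\\' :: 'n' :: rest) = String.ofList ['\\', 'n'] :: scanB rest := by
  simp [scanB]

theorem scanB_not_bs (c : Char) (rest : List Char) (h : c ≠ '\\') :
    scanB (c :: rest) = scanB rest := by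
  rw [scanB.eq_def]; split <;> simp_all

theorem scanB_bs_other (c : Char) (rest : List Char)
    (h1 : c ≠ 'v') (h2 : c ≠ 'x') (h3 : c ≠ 'n') :
    scanB ('\\' :: c :: rest) = scanB (c :: rest) := by
  rw [scanB.eq_def]; split <;> simp_all

theorem scanB_nil : scanB [] = [] := by
  simp [scanB]

theorem scanB_single (c : Char) : scanB [c] = [] := by
  rw [scanB.eq_def]; split <;> simp_all [scanB]

-- main invariant: A's scan from index i equals the regex scan over the remaining characters
theorem main_lemma (text : String) (fuel : Nat) :
    ∀ i, text.length ≤ fuel + i → goA text i = scanB (text.toList.drop i) := by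
  induction fuel with
  | zero =>
    intro i hf
    rw [goA, dif_neg (by omega), List.drop_eq_nil_of_le (by simpa using hf), scanB_nil]
  | succ fuel ih =>
    intro i hf
    by_cases h : i < text.length
    · have hm : i < text.toList.length := by simpa using h
      obtain ⟨c, rest, hdrop⟩ : ∃ c rest, text.toList.drop i = c :: rest := by
        cases hh : text.toList.drop i with
        | nil => exact absurd (by simpa using congrArg List.length hh) (by omega)
        | cons a b => exact ⟨a, b, rfl⟩
      have hdrop1 : text.toList.drop (i + 1) = rest := by
        rw [← List.tail_drop, hdrop, List.tail_cons]
      have e2 := slice_as_ofList text i 2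
      have e6 := slice_as_ofList text i 6
      have e10 := slice_as_ofList text i 10
      push_cast at e2 e6 e10
      rw [goA, dif_pos h, e2, e6, e10]
      by_cases hc : c = '\\'
      · subst hc
        cases rest with
        | nil =>
          have hno : ∀ (d : Char) (r : String), r.toList = ['\\', d] →
              String.ofList ((text.toList.drop i).take 2) ≠ r := by
            intro d r hr heq
            rw [ofList_eq_iff, hdrop, hr] at heq
            simp at heq
          rw [if_neg (hno 'v' "\\v" (by decide)), if_neg (hno 'x' "\\x" (by decide)),
              if_neg (hno 'n' "\\n" (by decide)),
              ih (i + 1) (by omega), hdrop1, hdrop, scanB_single, scanB_nil]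
        | cons d rest2 =>
          have htk : (text.toList.drop i).take 2 = ['\\', d] := by rw [hdrop]; rfl
          have hdrop2 : text.toList.drop (i + 2) = rest2 := by
            rw [← List.tail_drop, hdrop1, List.tail_cons]
          have hyes : ∀ (r : String), r.toList = ['\\', d] →
              String.ofList ((text.toList.drop i).take 2) = r := by
            intro r hr
            rw [ofList_eq_iff, htk, hr]
          have hne : ∀ (e : Char) (r : String), r.toList = ['\\', e] → d ≠ e →
              String.ofList ((text.toList.drop i).take 2) ≠ r := by
            intro e r hr hde heq
            rw [ofList_eq_iff, htk, hr] at heq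
            simp at heq
            exact hde heq
          by_cases hv : d = 'v'
          · subst hv
            have hT : (text.toList.drop i).take 10 = '\\' :: 'v' :: rest2.take 8 := by
              rw [hdrop]; rfl
            have hD : text.toList.drop (i + 10) = rest2.drop 8 := by
              rw [show i + 10 = (i + 2) + 8 from by omega, ← List.drop_drop, hdrop2]
            rw [if_pos (hyes "\\v" (by decide)), hT,
                ih (i + 10) (by omega), hD, hdrop, scanB_v]
          · by_cases hx : d = 'x'
            · subst hx
              have hT : (text.toList.drop i).take 6 = '\\' :: 'x' :: rest2.take 4 := by
                rw [hdrop]; rfl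
              have hD : text.toList.drop (i + 6) = rest2.drop 4 := by
                rw [show i + 6 = (i + 2) + 4 from by omega, ← List.drop_drop, hdrop2]
              rw [if_neg (hne 'v' "\\v" (by decide) hv),
                  if_pos (hyes "\\x" (by decide)), hT,
                  ih (i + 6) (by omega), hD, hdrop, scanB_x]
            · by_cases hn : d = 'n'
              · subst hn
                rw [if_neg (hne 'v' "\\v" (by decide) hv),
                    if_neg (hne 'x' "\\x" (by decide) hx),
                    if_pos (hyes "\\n" (by decide)), htk,
                    ih (i + 2) (by omega), hdrop2, hdrop, scanB_n]
              · rw [if_neg (hne 'v' "\\v" (by decide) hv),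
                    if_neg (hne 'x' "\\x" (by decide) hx),
                    if_neg (hne 'n' "\\n" (by decide) hn),
                    ih (i + 1) (by omega), hdrop1, hdrop,
                    scanB_bs_other d rest2 hv hx hn]
      · have hno : ∀ (d : Char) (r : String), r.toList = ['\\', d] →
            String.ofList ((text.toList.drop i).take 2) ≠ r := by
          intro d r hr heq
          rw [ofList_eq_iff, hdrop, hr] at heq
          have h2 : c :: rest.take 1 = ['\\', d] := heq
          exact hc (List.cons.inj h2).1
        rw [if_neg (hno 'v' "\\v" (by decide)), if_neg (hno 'x' "\\x" (by decide)),
            if_neg (hno 'n' "\\n" (by decide)),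
            ih (i + 1) (by omega), hdrop1, hdrop, scanB_not_bs c rest hc]
    · rw [goA, dif_neg h, List.drop_eq_nil_of_le (by simp; omega), scanB_nil]

-- ===== VERDICT (by name: the statement is the Claim_ definition above) =====
theorem extract_special_chars_spec : Claim_equal_extract_special_chars := by
  intro text _
  show extract_special_chars text = extract_special_chars_alt text
  unfold extract_special_chars extract_special_chars_alt
  rw [main_lemma text text.length 0 (by omega), List.drop_zero]
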